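-- pv_equiv track=rewrite | github.com/Manfr-edi/E-CoDrive | app.py | preferred_monitoring_vehicle_id
-- ===== SOURCE A (Python) =====
-- def is_carla_spawned_vehicle(vehicle):
--     """Return whether a live vehicle was spawned from the CARLA side."""
--     vehicle_id = str(vehicle.get("id", ""))
--     type_id = str(vehicle.get("type_id", ""))
--     return vehicle_id.startswith("carla") or type_id == "vehicle.lexus.utlexus"
--
-- def preferred_monitoring_vehicle_id(vehicles):
--     """Pick the default vehicle to monitor from the available live vehicles."""
--     for vehicle in vehicles:
--         if is_carla_spawned_vehicle(vehicle):
--             return vehicle["id"]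
--
--     for vehicle in vehicles:
--         if vehicle.get("id") == "ego_vehicle":
--             return vehicle["id"]
--
--     return vehicles[0]["id"] if vehicles else None
-- ===== SOURCE B (Python) =====
-- def is_carla_spawned_vehicle(vehicle):
--     """Return whether a live vehicle was spawned from the CARLA side."""
--     vehicle_id = str(vehicle.get("id", ""))
--     type_id = str(vehicle.get("type_id", ""))
--     return vehicle_id.startswith("carla") or type_id == "vehicle.lexus.utlexus"
--
-- def preferred_monitoring_vehicle_id(vehicles):
--     """Pick the default vehicle to monitor, in a single priority-tracking pass."""
--     ego = None
--     first = None
--     for vehicle in vehicles: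
--         if is_carla_spawned_vehicle(vehicle):
--             return vehicle["id"]
--         if ego is None and vehicle.get("id") == "ego_vehicle":
--             ego = vehicle
--         if first is None:
--             first = vehicle
--     if ego is not None:
--         return ego["id"]
--     if first is not None:
--         return first["id"]
--     return None
-- ===== Notes on version B (the rewrite author's own statement) =====
-- stated objective: alternative
-- what changed: Replaces A's two sequential scans plus a final head lookup with one single pass that tracks the first ego_vehicle and the first vehicle while returning immediately on a CARLA-spawned one.
import Mathlib
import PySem

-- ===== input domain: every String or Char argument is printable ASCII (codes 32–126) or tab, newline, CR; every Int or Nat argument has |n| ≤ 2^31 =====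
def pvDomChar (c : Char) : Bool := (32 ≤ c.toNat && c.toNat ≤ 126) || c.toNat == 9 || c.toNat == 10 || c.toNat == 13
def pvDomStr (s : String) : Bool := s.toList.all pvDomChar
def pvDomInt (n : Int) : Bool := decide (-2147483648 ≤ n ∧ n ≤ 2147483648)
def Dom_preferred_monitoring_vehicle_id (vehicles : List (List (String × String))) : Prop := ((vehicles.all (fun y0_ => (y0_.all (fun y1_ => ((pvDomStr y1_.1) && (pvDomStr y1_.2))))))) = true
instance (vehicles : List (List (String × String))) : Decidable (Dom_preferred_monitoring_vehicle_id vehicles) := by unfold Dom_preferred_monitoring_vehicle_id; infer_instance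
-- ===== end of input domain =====

-- B replaces A's two sequential scans + final head lookup by one single priority-tracking pass (alternative decomposition, same cost).
-- ===== PORT A =====
-- is_carla_spawned_vehicle: shared helper of both Pythons (vehicle.get of string values; str() is identity here)
def carlaSpawned (v : List (String × String)) : Bool :=
  PySem.Str.startswith (PySem.Dict.getD (PySem.Dict.mk v) "id" "") "carla" ||
  PySem.Dict.getD (PySem.Dict.mk v) "type_id" "" == "vehicle.lexus.utlexus"

-- first for-loop: some r = 'return r' fired (r = vehicle["id"]; none there = KeyError, outside Pre_)
def aLoop1 : List (List (String × String)) → Option (Option String)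
  | [] => none
  | v :: rest =>
    if carlaSpawned v then some (PySem.Dict.get? (PySem.Dict.mk v) "id") else aLoop1 rest

-- second for-loop: vehicle.get("id") == "ego_vehicle" then return vehicle["id"]
def aLoop2 : List (List (String × String)) → Option (Option String)
  | [] => none
  | v :: rest =>
    if PySem.Dict.get? (PySem.Dict.mk v) "id" == some "ego_vehicle" then
      some (PySem.Dict.get? (PySem.Dict.mk v) "id")
    else aLoop2 rest

def preferred_monitoring_vehicle_id (vehicles : List (List (String × String))) : Option String :=
  match aLoop1 vehicles with
  | some r => r
  | none =>
    match aLoop2 vehicles with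
    | some r => r
    | none =>
      match vehicles with
      | [] => none
      | v :: _ => PySem.Dict.get? (PySem.Dict.mk v) "id"

-- ===== PORT B =====
-- single pass: return carla id at once, else track first ego_vehicle and first vehicle
def bLoop : List (List (String × String)) → Option (List (String × String)) → Option (List (String × String)) → Option String
  | [], ego, first =>
    match ego with
    | some e => PySem.Dict.get? (PySem.Dict.mk e) "id"
    | none =>
      match first with
      | some f => PySem.Dict.get? (PySem.Dict.mk f) "id"
      | none => none
  | v :: rest, ego, first =>
    if carlaSpawned v then PySem.Dict.get? (PySem.Dict.mk v) "id"
    else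
      bLoop rest
        (if ego.isNone && (PySem.Dict.get? (PySem.Dict.mk v) "id" == some "ego_vehicle") then some v else ego)
        (if first.isNone then some v else first)

def preferred_monitoring_vehicle_id_alt (vehicles : List (List (String × String))) : Option String :=
  bLoop vehicles none none

-- ===== PRECONDITION & SPEC =====
-- Pre_ excludes exactly the KeyError inputs: the first CARLA-spawned vehicle lacking an "id" key,
-- or (no CARLA and no ego_vehicle match) a non-empty list whose first vehicle lacks an "id" key.
def Pre_preferred_monitoring_vehicle_id (vehicles : List (List (String × String))) : Prop :=
  ((vehicles.find? carlaSpawned).all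
      (fun v => (PySem.Dict.get? (PySem.Dict.mk v) "id").isSome)) = true ∧
  (vehicles.find? carlaSpawned = none →
    (∃ v ∈ vehicles, PySem.Dict.get? (PySem.Dict.mk v) "id" = some "ego_vehicle") ∨
    (vehicles.head?.all
        (fun v => (PySem.Dict.get? (PySem.Dict.mk v) "id").isSome)) = true)
instance (vehicles : List (List (String × String))) : Decidable (Pre_preferred_monitoring_vehicle_id vehicles) := by
  unfold Pre_preferred_monitoring_vehicle_id; infer_instance
def pvWitness_preferred_monitoring_vehicle_id : (List (List (String × String))) :=
  [[("id", "truck7")], [("id", "ego_vehicle")]]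

def Spec_preferred_monitoring_vehicle_id (vehicles : List (List (String × String))) (out : Option String) : Prop := out = preferred_monitoring_vehicle_id_alt vehicles
instance (vehicles : List (List (String × String))) (out : Option String) : Decidable (Spec_preferred_monitoring_vehicle_id vehicles out) := by unfold Spec_preferred_monitoring_vehicle_id; infer_instance

-- ===== CLAIM (what is proved, stated in full; the proofs are below) =====
def Claim_equal_preferred_monitoring_vehicle_id : Prop := ∀ (vehicles : List (List (String × String))), Dom_preferred_monitoring_vehicle_id vehicles → Pre_preferred_monitoring_vehicle_id vehicles → Spec_preferred_monitoring_vehicle_id vehicles (preferred_monitoring_vehicle_id vehicles)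

-- ===== LEMMAS AND PROOFS =====
-- Loop invariant: bLoop with accumulators computes A's priority cascade, the accumulated
-- ego/first standing in for matches already seen.
theorem bLoop_eq (vs : List (List (String × String)))
    (ego first : Option (List (String × String))) :
    bLoop vs ego first =
      match aLoop1 vs with
      | some r => r
      | none =>
        match ego with
        | some e => PySem.Dict.get? (PySem.Dict.mk e) "id"
        | none =>
          match aLoop2 vs with
          | some r => r
          | none =>
            match first with
            | some f => PySem.Dict.get? (PySem.Dict.mk f) "id"
            | none =>
              match vs with
              | [] => none
              | v :: _ => PySem.Dict.get? (PySem.Dict.mk v) "id" := by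
  induction vs generalizing ego first with
  | nil => cases ego <;> cases first <;> simp [bLoop, aLoop1, aLoop2]
  | cons v rest ih =>
    by_cases hc : carlaSpawned v
    · simp [bLoop, aLoop1, hc]
    · by_cases he : PySem.Dict.get? (PySem.Dict.mk v) "id" == some "ego_vehicle"
      · cases ego <;> cases first <;>
          simp [bLoop, aLoop1, aLoop2, hc, he, ih] <;>
          (try cases aLoop1 rest) <;> (try simp)
      · cases ego <;> cases first <;>
          simp [bLoop, aLoop1, aLoop2, hc, he, ih] <;>
          (try cases aLoop1 rest) <;> (try simp) <;>
          (try cases aLoop2 rest) <;> (try simp)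

-- ===== VERDICT (by name: the statement is the Claim_ definition above) =====
theorem preferred_monitoring_vehicle_id_spec : Claim_equal_preferred_monitoring_vehicle_id := by
  intro vehicles _ _
  unfold Spec_preferred_monitoring_vehicle_id
  unfold preferred_monitoring_vehicle_id preferred_monitoring_vehicle_id_alt
  rw [bLoop_eq]
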